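-- pv_equiv track=rewrite | github.com/HudaK42/Book-Summarizer | backend/post_processing.py | reorder_sentences
-- ===== SOURCE A (Python) =====
-- def reorder_sentences(sentences):
--     intro = []
--     body = []
--     conclusion = []
--
--     for s in sentences:
--         s_lower = s.lower()
--         if any(word in s_lower for word in ["in conclusion", "overall", "thus", "finally"]):
--             conclusion.append(s)
--         elif len(s.split()) < 12:
--             intro.append(s)
--         else:
--             body.append(s)
--
--     return intro + body + conclusion
-- ===== SOURCE B (Python) =====
-- def reorder_sentences(sentences):
--     def key(s):
--         s_lower = s.lower()
--         if any(word in s_lower for word in ["in conclusion", "overall", "thus", "finally"]):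
--             return 2
--         if len(s.split()) < 12:
--             return 0
--         return 1
--     return sorted(sentences, key=key)
-- ===== Notes on version B (the rewrite author's own statement) =====
-- stated objective: idiomatic
-- what changed: Replaces the three explicit buckets and concatenation with a single stable sort by a 0/1/2 category key; Python's stable sort keeps original order within each category, so the output is identical.
import Mathlib
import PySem

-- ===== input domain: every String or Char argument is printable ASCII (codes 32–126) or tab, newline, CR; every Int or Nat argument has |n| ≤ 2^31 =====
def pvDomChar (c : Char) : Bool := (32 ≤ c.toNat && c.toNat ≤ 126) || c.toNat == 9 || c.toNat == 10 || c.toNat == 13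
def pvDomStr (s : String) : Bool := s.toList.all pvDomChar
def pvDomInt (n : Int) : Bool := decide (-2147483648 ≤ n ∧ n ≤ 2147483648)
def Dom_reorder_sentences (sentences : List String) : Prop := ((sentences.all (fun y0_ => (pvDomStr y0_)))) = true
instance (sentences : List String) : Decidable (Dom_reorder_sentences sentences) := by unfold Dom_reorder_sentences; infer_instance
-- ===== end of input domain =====

-- B replaces the three explicit buckets with a single stable sort by a 0/1/2 category key (more idiomatic; output identical because the sort is stable).


-- ===== PORT A =====
-- 'any(word in s_lower for word in [...])' with s_lower = s.lower()
def pvIsConcl (s : String) : Bool :=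
  ["in conclusion", "overall", "thus", "finally"].any
    (fun word => PySem.Str.isIn word (PySem.Str.lower s))

-- 'len(s.split()) < 12'
def pvIsShort (s : String) : Bool := decide ((PySem.Str.split₀ s).length < 12)

def reorder_sentences (sentences : List String) : List String :=
  let acc := sentences.foldl
    (fun (acc : List String × List String × List String) s =>
      if pvIsConcl s then (acc.1, acc.2.1, acc.2.2 ++ [s])
      else if pvIsShort s then (acc.1 ++ [s], acc.2.1, acc.2.2)
      else (acc.1, acc.2.1 ++ [s], acc.2.2))
    ([], [], [])
  acc.1 ++ acc.2.1 ++ acc.2.2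

-- ===== PORT B =====
-- B's key: 2 for keyword sentences, 0 for short ones, 1 otherwise
def pvKey (s : String) : Int :=
  if pvIsConcl s then 2
  else if pvIsShort s then 0
  else 1

def reorder_sentences_alt (sentences : List String) : List String :=
  PySem.List.sorted sentences pvKey

-- ===== PRECONDITION & SPEC =====
def Spec_reorder_sentences (sentences : List String) (out : List String) : Prop := out = reorder_sentences_alt sentences
instance (sentences : List String) (out : List String) : Decidable (Spec_reorder_sentences sentences out) := by unfold Spec_reorder_sentences; infer_instance

-- ===== CLAIM (what is proved, stated in full; the proofs are below) =====
def Claim_equal_reorder_sentences : Prop := ∀ (sentences : List String), Dom_reorder_sentences sentences → Spec_reorder_sentences sentences (reorder_sentences sentences)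

-- ===== LEMMAS AND PROOFS =====

theorem pvKey_cases (s : String) : pvKey s = 0 ∨ pvKey s = 1 ∨ pvKey s = 2 := by
  unfold pvKey; split_ifs <;> simp

-- A's fold appends each sentence to the bucket selected by pvKey
theorem pvA_foldl (xs : List String) (i b c : List String) :
    xs.foldl
      (fun (acc : List String × List String × List String) s =>
        if pvIsConcl s then (acc.1, acc.2.1, acc.2.2 ++ [s])
        else if pvIsShort s then (acc.1 ++ [s], acc.2.1, acc.2.2)
        else (acc.1, acc.2.1 ++ [s], acc.2.2))
      (i, b, c)
    = (i ++ xs.filter (fun s => pvKey s == 0),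
       b ++ xs.filter (fun s => pvKey s == 1),
       c ++ xs.filter (fun s => pvKey s == 2)) := by
  induction xs generalizing i b c with
  | nil => simp
  | cons s t ih =>
    simp only [List.foldl_cons, List.filter_cons]
    by_cases h1 : pvIsConcl s
    · have hk : pvKey s = 2 := by simp [pvKey, h1]
      simp [h1, ih, hk, List.append_assoc]
    · by_cases h2 : pvIsShort s
      · have hk : pvKey s = 0 := by simp [pvKey, h1, h2]
        simp [h1, h2, ih, hk, List.append_assoc]
      · have hk : pvKey s = 1 := by simp [pvKey, h1, h2]
        simp [h1, h2, ih, hk, List.append_assoc]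

theorem pv_insertBy_skip {α : Type} (before : α → α → Bool) (x : α) (l r : List α)
    (h : ∀ y ∈ l, before x y = false) :
    PySem.List.insertBy before x (l ++ r) = l ++ PySem.List.insertBy before x r := by
  induction l with
  | nil => simp
  | cons y ys ih =>
    simp only [List.cons_append, PySem.List.insertBy, h y (by simp)]
    simp only [Bool.false_eq_true, if_false]
    rw [ih (fun z hz => h z (by simp [hz]))]

theorem pv_insertBy_head {α : Type} (before : α → α → Bool) (x : α) (l : List α)
    (h : ∀ y ∈ l, before x y = true) :
    PySem.List.insertBy before x l = x :: l := by
  cases l with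
  | nil => rfl
  | cons y ys => simp [PySem.List.insertBy, h y (by simp)]

theorem pv_mem_filter_key (k : Int) (xs : List String) (y : String)
    (hy : y ∈ xs.filter (fun s => pvKey s == k)) : pvKey y = k := by
  have := List.of_mem_filter hy
  simpa using this

-- B's stable sort produces exactly the three key-classes in order, each in original order
theorem pvB_sorted (xs : List String) :
    PySem.List.sorted xs pvKey
    = xs.filter (fun s => pvKey s == 0) ++ (xs.filter (fun s => pvKey s == 1)
      ++ xs.filter (fun s => pvKey s == 2)) := by
  rw [PySem.List.sorted_eq_foldl_insertBy]
  induction xs using List.reverseRecOn with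
  | nil => simp
  | append_singleton t x ih =>
    rw [List.foldl_append, List.foldl_cons, List.foldl_nil, ih]
    simp only [List.filter_append, List.filter_cons, List.filter_nil]
    rcases pvKey_cases x with hk | hk | hk <;> simp only [hk]
    · rw [pv_insertBy_skip _ _ _ _
        (fun y hy => by simp [pv_mem_filter_key 0 t y hy, hk]),
        pv_insertBy_head _ _ _
        (fun y hy => by
          rcases List.mem_append.mp hy with h | h
          · simp [pv_mem_filter_key 1 t y h, hk]
          · simp [pv_mem_filter_key 2 t y h, hk])]
      simp
    · rw [pv_insertBy_skip _ _ _ _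
        (fun y hy => by simp [pv_mem_filter_key 0 t y hy, hk]),
        pv_insertBy_skip _ _ _ _
        (fun y hy => by simp [pv_mem_filter_key 1 t y hy, hk]),
        pv_insertBy_head _ _ _
        (fun y hy => by simp [pv_mem_filter_key 2 t y hy, hk])]
      simp
    · rw [PySem.List.insertBy_of_forall_not_before _ _ _
        (fun y hy => by
          rcases List.mem_append.mp hy with h | h
          · simp [pv_mem_filter_key 0 t y h, hk]
          · rcases List.mem_append.mp h with h' | h'
            · simp [pv_mem_filter_key 1 t y h', hk]
            · simp [pv_mem_filter_key 2 t y h', hk])]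
      simp

-- ===== VERDICT (by name: the statement is the Claim_ definition above) =====
theorem reorder_sentences_spec : Claim_equal_reorder_sentences := by
  intro xs _
  show reorder_sentences xs = reorder_sentences_alt xs
  unfold reorder_sentences reorder_sentences_alt
  rw [pvA_foldl, pvB_sorted]
  simp
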